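-- pv_equiv track=rewrite | github.com/d4lion/FDP-UN | minas_lab/Python/practica-9/f-practica-6.py | analizar_matriz
-- ===== SOURCE A (Python) =====
-- def obtener_producto(ls: list) -> int:
--     producto = 1
--
--     for l in ls:
--         producto *= l
--     return producto
--
-- def analizar_matriz(_matriz: list[list]) -> dict[str, dict[str, int]]:
--     resultados = {
--         "mayor_fila": {
--             "indice": 0,
--             "producto": obtener_producto(_matriz[0])
--         },
--         "menor_fila": {
--             "indice": 0,
--             "producto": obtener_producto(_matriz[0])
--         }}
--
--     for index, fila in enumerate(_matriz):
--
--         producto_fila = obtener_producto(fila)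
--
--         if resultados['mayor_fila']["producto"] < producto_fila:
--             resultados['mayor_fila']["indice"] = index
--             resultados['mayor_fila']["producto"] = producto_fila
--
--         if resultados['menor_fila']["producto"] > producto_fila:
--             resultados['menor_fila']["indice"] = index
--             resultados['menor_fila']["producto"] = producto_fila
--
--     return resultados
-- ===== SOURCE B (Python) =====
-- def _producto(fila: list) -> int:
--     p = 1
--     for x in fila:
--         p *= x
--     return p
--
-- def analizar_matriz(_matriz: list[list]) -> dict[str, dict[str, int]]:
--     productos = [_producto(fila) for fila in _matriz]
--     mayor = max(productos)
--     menor = min(productos)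
--     return {
--         "mayor_fila": {"indice": productos.index(mayor), "producto": mayor},
--         "menor_fila": {"indice": productos.index(menor), "producto": menor},
--     }
-- ===== Notes on version B (the rewrite author's own statement) =====
-- stated objective: simpler
-- what changed: B computes the list of row products once, then uses max/min and first-occurrence .index instead of A's single pass threading a nested result dict with two running best states.
import Mathlib
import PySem

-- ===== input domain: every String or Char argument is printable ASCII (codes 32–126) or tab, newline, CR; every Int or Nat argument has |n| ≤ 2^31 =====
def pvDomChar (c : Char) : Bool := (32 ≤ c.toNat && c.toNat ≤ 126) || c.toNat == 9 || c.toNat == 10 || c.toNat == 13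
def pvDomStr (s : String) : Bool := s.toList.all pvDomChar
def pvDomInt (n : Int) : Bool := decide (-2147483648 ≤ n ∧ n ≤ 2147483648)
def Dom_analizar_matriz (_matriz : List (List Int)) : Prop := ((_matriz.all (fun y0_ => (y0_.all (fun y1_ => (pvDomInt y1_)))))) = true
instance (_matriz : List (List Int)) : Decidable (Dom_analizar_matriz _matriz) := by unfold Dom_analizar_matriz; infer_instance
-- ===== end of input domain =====

-- B replaces A's single pass threading a nested result dict by: products list once, then max/min
-- and first-occurrence .index (simpler decomposition, same cost). Equivalence of return values only.

-- ===== PORT A =====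
def obtener_producto (ls : List Int) : Int :=
  ls.foldl (fun producto l => producto * l) 1

-- `_matriz[0]` raises IndexError on the empty matrix; Pre_ excludes it, so `headD []` stands for it
def analizar_matriz (_matriz : List (List Int)) : List (String × List (String × Int)) :=
  let p0 := obtener_producto (_matriz.headD [])
  let st := (PySem.List.enumerate _matriz).foldl
    (fun (st : (Int × Int) × (Int × Int)) x =>
      let producto_fila := obtener_producto x.2
      ((if st.1.2 < producto_fila then (x.1, producto_fila) else st.1),
       (if st.2.2 > producto_fila then (x.1, producto_fila) else st.2)))
    ((0, p0), (0, p0))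
  [("mayor_fila", [("indice", st.1.1), ("producto", st.1.2)]),
   ("menor_fila", [("indice", st.2.1), ("producto", st.2.2)])]

-- ===== PORT B =====
def producto_alt (fila : List Int) : Int :=
  fila.foldl (fun p x => p * x) 1

def analizar_matriz_alt (_matriz : List (List Int)) : List (String × List (String × Int)) :=
  let productos := _matriz.map producto_alt
  match PySem.List.max? productos (fun y => y), PySem.List.min? productos (fun y => y) with
  | some mayor, some menor =>
      [("mayor_fila", [("indice", (((PySem.List.index? productos mayor).getD 0 : Nat) : Int)),
                       ("producto", mayor)]),
       ("menor_fila", [("indice", (((PySem.List.index? productos menor).getD 0 : Nat) : Int)),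
                       ("producto", menor)])]
  | _, _ => []   -- Python's max([]) raises ValueError here; outside Pre_

-- ===== PRECONDITION & SPEC =====
-- Pre_ excludes only the empty matrix, on which A raises IndexError (_matriz[0]).
def Pre_analizar_matriz (_matriz : List (List Int)) : Prop := _matriz ≠ []
instance (_matriz : List (List Int)) : Decidable (Pre_analizar_matriz _matriz) := by unfold Pre_analizar_matriz; infer_instance

def pvWitness_analizar_matriz : List (List Int) := [[2, 3], [], [-1]]

def Spec_analizar_matriz (_matriz : List (List Int)) (out : List (String × List (String × Int))) : Prop := out = analizar_matriz_alt _matriz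
instance (_matriz : List (List Int)) (out : List (String × List (String × Int))) : Decidable (Spec_analizar_matriz _matriz out) := by unfold Spec_analizar_matriz; infer_instance

-- ===== CLAIM (what is proved, stated in full; the proofs are below) =====
def Claim_equal_analizar_matriz : Prop := ∀ (_matriz : List (List Int)), Dom_analizar_matriz _matriz → Pre_analizar_matriz _matriz → Spec_analizar_matriz _matriz (analizar_matriz _matriz)

-- ===== LEMMAS AND PROOFS =====

lemma enumerate_map (f : List Int → Int) (m : List (List Int)) (k : Int) :
    PySem.List.enumerate (m.map f) k = (PySem.List.enumerate m k).map (fun x => (x.1, f x.2)) := by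
  induction m generalizing k with
  | nil => simp [PySem.List.enumerate]
  | cons r rs ih => simp [PySem.List.enumerate_cons, ih]

lemma foldl_max_all_le (t : List Int) (q : Int) (h : ∀ x ∈ t, x ≤ q) : t.foldl max q = q := by
  rcases PySem.List.foldl_max_mem t q with h1 | h1
  · exact h1
  · exact le_antisymm (h _ h1) (PySem.List.le_foldl_max t q).1

lemma foldl_min_all_ge (t : List Int) (q : Int) (h : ∀ x ∈ t, q ≤ x) : t.foldl min q = q := by
  rcases PySem.List.foldl_min_mem t q with h1 | h1
  · exact h1
  · exact le_antisymm (PySem.List.foldl_min_le t q).1 (h _ h1)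

-- the running-max scan of A characterised: untouched start if nothing beats p, else first argmax
lemma gmax (qs : List Int) (i p k : Int) :
    (PySem.List.enumerate qs k).foldl
        (fun (st : Int × Int) (x : Int × Int) => if st.2 < x.2 then x else st) (i, p) =
      if qs.all (· ≤ p) then (i, p)
      else (k + (((PySem.List.index? qs (qs.foldl max p)).getD 0 : Nat) : Int), qs.foldl max p) := by
  induction qs generalizing i p k with
  | nil => simp
  | cons q t ih =>
    rw [PySem.List.enumerate_cons, List.foldl_cons]
    by_cases hpq : p < q
    · simp only [if_pos hpq]
      rw [ih]
      have hM : (q :: t).foldl max p = t.foldl max q := by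
        simp [List.foldl_cons, max_eq_right hpq.le]
      have hcond : ¬ (q :: t).all (· ≤ p) := by
        simp only [List.all_cons, Bool.and_eq_true, decide_eq_true_eq, not_and]
        intro h; omega
      rw [if_neg hcond, hM]
      by_cases hall : t.all (· ≤ q)
      · have : t.foldl max q = q := by
          apply foldl_max_all_le
          intro x hx; simpa using (List.all_eq_true.mp hall) x hx
        rw [if_pos hall, this, PySem.List.index?_cons_self]
        simp
      · rw [if_neg hall]
        have hlt : q < t.foldl max q := by
          rcases PySem.List.foldl_max_mem t q with h1 | h1
          · exfalso; apply hall
            rw [List.all_eq_true]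
            intro x hx
            have := (PySem.List.le_foldl_max t q).2 x hx
            simpa using this.trans_eq h1
          · rcases lt_or_eq_of_le (PySem.List.le_foldl_max t q).1 with h2 | h2
            · exact h2
            · exfalso; apply hall
              rw [List.all_eq_true]
              intro x hx
              have := (PySem.List.le_foldl_max t q).2 x hx
              simpa using this.trans_eq h2.symm
        have hmem : t.foldl max q ∈ t := by
          rcases PySem.List.foldl_max_mem t q with h1 | h1
          · omega
          · exact h1
        rw [PySem.List.index?_cons_of_ne _ (by omega)]
        obtain ⟨j, hj⟩ := Option.isSome_iff_exists.mp ((PySem.List.index?_isSome_iff t (t.foldl max q)).mpr hmem)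
        · rw [hj]; simp; ring
    · simp only [if_neg hpq]
      rw [ih]
      have hqp : q ≤ p := by omega
      have hM : (q :: t).foldl max p = t.foldl max p := by
        simp [List.foldl_cons, max_eq_left hqp]
      have hcond : (q :: t).all (· ≤ p) = t.all (· ≤ p) := by
        simp [List.all_cons, hqp]
      rw [hcond, hM]
      by_cases hall : t.all (· ≤ p)
      · rw [if_pos hall, if_pos hall]
      · rw [if_neg hall, if_neg hall]
        have hlt : p < t.foldl max p := by
          rcases PySem.List.foldl_max_mem t p with h1 | h1
          · exfalso; apply hall
            rw [List.all_eq_true]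
            intro x hx
            have := (PySem.List.le_foldl_max t p).2 x hx
            simpa using this.trans_eq h1
          · rcases lt_or_eq_of_le (PySem.List.le_foldl_max t p).1 with h2 | h2
            · exact h2
            · exfalso; apply hall
              rw [List.all_eq_true]
              intro x hx
              have := (PySem.List.le_foldl_max t p).2 x hx
              simpa using this.trans_eq h2.symm
        have hmem : t.foldl max p ∈ t := by
          rcases PySem.List.foldl_max_mem t p with h1 | h1
          · omega
          · exact h1
        rw [PySem.List.index?_cons_of_ne _ (by omega)]
        obtain ⟨j, hj⟩ := Option.isSome_iff_exists.mp ((PySem.List.index?_isSome_iff t (t.foldl max p)).mpr hmem)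
        · rw [hj]; simp; ring

-- the running-min scan, symmetrically
lemma gmin (qs : List Int) (i p k : Int) :
    (PySem.List.enumerate qs k).foldl
        (fun (st : Int × Int) (x : Int × Int) => if st.2 > x.2 then x else st) (i, p) =
      if qs.all (p ≤ ·) then (i, p)
      else (k + (((PySem.List.index? qs (qs.foldl min p)).getD 0 : Nat) : Int), qs.foldl min p) := by
  induction qs generalizing i p k with
  | nil => simp
  | cons q t ih =>
    rw [PySem.List.enumerate_cons, List.foldl_cons]
    by_cases hpq : p > q
    · simp only [if_pos hpq]
      rw [ih]
      have hM : (q :: t).foldl min p = t.foldl min q := by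
        simp [List.foldl_cons, min_eq_right hpq.le]
      have hcond : ¬ (q :: t).all (p ≤ ·) := by
        simp only [List.all_cons, Bool.and_eq_true, decide_eq_true_eq, not_and]
        intro h; omega
      rw [if_neg hcond, hM]
      by_cases hall : t.all (q ≤ ·)
      · have : t.foldl min q = q := by
          apply foldl_min_all_ge
          intro x hx; simpa using (List.all_eq_true.mp hall) x hx
        rw [if_pos hall, this, PySem.List.index?_cons_self]
        simp
      · rw [if_neg hall]
        have hlt : t.foldl min q < q := by
          rcases PySem.List.foldl_min_mem t q with h1 | h1
          · exfalso; apply hall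
            rw [List.all_eq_true]
            intro x hx
            have := (PySem.List.foldl_min_le t q).2 x hx
            simpa using h1 ▸ this
          · rcases lt_or_eq_of_le (PySem.List.foldl_min_le t q).1 with h2 | h2
            · exact h2
            · exfalso; apply hall
              rw [List.all_eq_true]
              intro x hx
              have := (PySem.List.foldl_min_le t q).2 x hx
              simpa using h2 ▸ this
        have hmem : t.foldl min q ∈ t := by
          rcases PySem.List.foldl_min_mem t q with h1 | h1
          · omega
          · exact h1
        rw [PySem.List.index?_cons_of_ne _ (by omega)]
        obtain ⟨j, hj⟩ := Option.isSome_iff_exists.mp ((PySem.List.index?_isSome_iff t (t.foldl min q)).mpr hmem)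
        · rw [hj]; simp; ring
    · simp only [if_neg hpq]
      rw [ih]
      have hqp : p ≤ q := by omega
      have hM : (q :: t).foldl min p = t.foldl min p := by
        simp [List.foldl_cons, min_eq_left hqp]
      have hcond : (q :: t).all (p ≤ ·) = t.all (p ≤ ·) := by
        simp [List.all_cons, hqp]
      rw [hcond, hM]
      by_cases hall : t.all (p ≤ ·)
      · rw [if_pos hall, if_pos hall]
      · rw [if_neg hall, if_neg hall]
        have hlt : t.foldl min p < p := by
          rcases PySem.List.foldl_min_mem t p with h1 | h1
          · exfalso; apply hall
            rw [List.all_eq_true]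
            intro x hx
            have := (PySem.List.foldl_min_le t p).2 x hx
            simpa using h1 ▸ this
          · rcases lt_or_eq_of_le (PySem.List.foldl_min_le t p).1 with h2 | h2
            · exact h2
            · exfalso; apply hall
              rw [List.all_eq_true]
              intro x hx
              have := (PySem.List.foldl_min_le t p).2 x hx
              simpa using h2 ▸ this
        have hmem : t.foldl min p ∈ t := by
          rcases PySem.List.foldl_min_mem t p with h1 | h1
          · omega
          · exact h1
        rw [PySem.List.index?_cons_of_ne _ (by omega)]
        obtain ⟨j, hj⟩ := Option.isSome_iff_exists.mp ((PySem.List.index?_isSome_iff t (t.foldl min p)).mpr hmem)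
        · rw [hj]; simp; ring

-- ===== VERDICT (by name: the statement is the Claim_ definition above) =====
theorem analizar_matriz_spec : Claim_equal_analizar_matriz := by
  intro m _hdom hpre
  unfold Spec_analizar_matriz
  match m with
  | [] => exact absurd rfl hpre
  | r :: rs =>
    show analizar_matriz (r :: rs) = analizar_matriz_alt (r :: rs)
    have hps : (r :: rs).map producto_alt = obtener_producto r :: rs.map obtener_producto := rfl
    have hA :
        (PySem.List.enumerate (r :: rs)).foldl
          (fun (st : (Int × Int) × (Int × Int)) x =>
            let producto_fila := obtener_producto x.2
            ((if st.1.2 < producto_fila then (x.1, producto_fila) else st.1),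
             (if st.2.2 > producto_fila then (x.1, producto_fila) else st.2)))
          ((0, obtener_producto r), (0, obtener_producto r))
        = ((PySem.List.enumerate (obtener_producto r :: rs.map obtener_producto)).foldl
             (fun (st : Int × Int) (x : Int × Int) => if st.2 < x.2 then x else st)
             (0, obtener_producto r),
           (PySem.List.enumerate (obtener_producto r :: rs.map obtener_producto)).foldl
             (fun (st : Int × Int) (x : Int × Int) => if st.2 > x.2 then x else st)
             (0, obtener_producto r)) := by
      rw [← PySem.List.foldl_prod_mk,
          show (obtener_producto r :: rs.map obtener_producto) = (r :: rs).map obtener_producto from rfl,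
          enumerate_map, List.foldl_map]
    simp only [analizar_matriz, analizar_matriz_alt, List.headD_cons, hps,
      PySem.List.max?_id_cons, PySem.List.min?_id_cons, hA, gmax, gmin]
    have cmaxiff : (((obtener_producto r :: rs.map obtener_producto).all
        fun x => decide (x ≤ obtener_producto r)) = true)
        ↔ (∀ x ∈ rs, obtener_producto x ≤ obtener_producto r) := by simp
    have cminiff : (((obtener_producto r :: rs.map obtener_producto).all
        fun x => decide (obtener_producto r ≤ x)) = true)
        ↔ (∀ x ∈ rs, obtener_producto r ≤ obtener_producto x) := by simp
    by_cases hallmax : ∀ x ∈ rs, obtener_producto x ≤ obtener_producto r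
    · have hMr : (rs.map obtener_producto).foldl max (obtener_producto r) = obtener_producto r := by
        apply foldl_max_all_le
        intro x hx
        obtain ⟨y, hy, rfl⟩ := List.mem_map.mp hx
        exact hallmax y hy
      by_cases hallmin : ∀ x ∈ rs, obtener_producto r ≤ obtener_producto x
      · have hmr : (rs.map obtener_producto).foldl min (obtener_producto r) = obtener_producto r := by
          apply foldl_min_all_ge
          intro x hx
          obtain ⟨y, hy, rfl⟩ := List.mem_map.mp hx
          exact hallmin y hy
        rw [if_pos (cmaxiff.mpr hallmax), if_pos (cminiff.mpr hallmin)]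
        simp [hMr, hmr, List.idxOf?_cons]
      · rw [if_pos (cmaxiff.mpr hallmax), if_neg (fun h => hallmin (cminiff.mp h))]
        simp [hMr, List.idxOf?_cons]
    · by_cases hallmin : ∀ x ∈ rs, obtener_producto r ≤ obtener_producto x
      · have hmr : (rs.map obtener_producto).foldl min (obtener_producto r) = obtener_producto r := by
          apply foldl_min_all_ge
          intro x hx
          obtain ⟨y, hy, rfl⟩ := List.mem_map.mp hx
          exact hallmin y hy
        rw [if_neg (fun h => hallmax (cmaxiff.mp h)), if_pos (cminiff.mpr hallmin)]
        simp [hmr, List.idxOf?_cons]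
      · rw [if_neg (fun h => hallmax (cmaxiff.mp h)), if_neg (fun h => hallmin (cminiff.mp h))]
        simp
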